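-- pv_equiv track=rewrite | github.com/CDOT-CV/Work_Zone | wzdx/standard_to_enhanced/planned_events_translator.py | get_vehicle_impact
-- ===== SOURCE A (Python) =====
-- def get_vehicle_impact(lanes):
--     num_lanes = len(lanes)
--     num_closed_lanes = 0
--     for i in lanes:
--         if i['status'] != 'open':
--             num_closed_lanes += 1
--     if num_closed_lanes == num_lanes:
--         return 'all-lanes-closed'
--     elif num_closed_lanes == 0:
--         return 'all-lanes-open'
--     else:
--         return 'some-lanes-closed'
-- ===== SOURCE B (Python) =====
-- def get_vehicle_impact(lanes):
--     statuses = {l['status'] for l in lanes}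
--     if 'open' not in statuses:
--         return 'all-lanes-closed'
--     if statuses == {'open'}:
--         return 'all-lanes-open'
--     return 'some-lanes-closed'
-- ===== Notes on version B (the rewrite author's own statement) =====
-- stated objective: idiomatic
-- what changed: Replaces the closed-lane counter and count-vs-length comparisons with a one-pass set of distinct status values classified by membership ('open' not in statuses) and set equality (statuses == {'open'}).
import Mathlib
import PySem

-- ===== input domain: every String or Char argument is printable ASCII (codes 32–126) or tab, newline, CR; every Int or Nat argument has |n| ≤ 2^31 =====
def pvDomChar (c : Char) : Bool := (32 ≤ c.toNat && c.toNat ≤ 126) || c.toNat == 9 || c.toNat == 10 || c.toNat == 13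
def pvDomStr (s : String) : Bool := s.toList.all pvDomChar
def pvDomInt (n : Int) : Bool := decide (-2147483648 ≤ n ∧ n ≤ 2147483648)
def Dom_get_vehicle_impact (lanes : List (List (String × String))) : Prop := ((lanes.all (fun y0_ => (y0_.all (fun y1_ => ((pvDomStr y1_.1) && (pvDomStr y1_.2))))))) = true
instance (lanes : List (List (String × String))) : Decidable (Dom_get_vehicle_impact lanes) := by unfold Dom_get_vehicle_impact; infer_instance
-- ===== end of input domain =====

-- B builds the set of distinct status values and classifies by membership / set equality,
-- instead of A's closed-lane counter compared with the list length.  Objective: idiomatic.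

-- ===== PORT A =====
-- i['status'] = (PySem.Dict.mk i).get? "status"; Pre_ guarantees it is `some`, `.getD ""` is the total form.
def get_vehicle_impact (lanes : List (List (String × String))) : String :=
  let num_lanes := lanes.length
  let num_closed_lanes : Int := lanes.foldl
    (fun n i => if ((PySem.Dict.mk i).get? "status").getD "" ≠ "open" then n + 1 else n) 0
  if num_closed_lanes = (num_lanes : Int) then "all-lanes-closed"
  else if num_closed_lanes = 0 then "all-lanes-open"
  else "some-lanes-closed"

-- ===== PORT B =====
def get_vehicle_impact_alt (lanes : List (List (String × String))) : String :=
  let statuses : PySem.Set String :=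
    PySem.Set.ofList (lanes.map (fun l => ((PySem.Dict.mk l).get? "status").getD ""))
  if ¬ PySem.Set.contains statuses "open" then "all-lanes-closed"
  else if PySem.Set.equal statuses ["open"] then "all-lanes-open"
  else "some-lanes-closed"

-- ===== PRECONDITION & SPEC =====
-- Pre_ excludes exactly the lanes lacking a 'status' key, on which A (and B) raise KeyError.
def Pre_get_vehicle_impact (lanes : List (List (String × String))) : Prop :=
  ∀ l ∈ lanes, ((PySem.Dict.mk l).get? "status").isSome
instance (lanes : List (List (String × String))) : Decidable (Pre_get_vehicle_impact lanes) := by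
  unfold Pre_get_vehicle_impact; infer_instance
def pvWitness_get_vehicle_impact : (List (List (String × String))) :=
  [[("status", "open")], [("status", "closed")]]
def Spec_get_vehicle_impact (lanes : List (List (String × String))) (out : String) : Prop := out = get_vehicle_impact_alt lanes
instance (lanes : List (List (String × String))) (out : String) : Decidable (Spec_get_vehicle_impact lanes out) := by unfold Spec_get_vehicle_impact; infer_instance

-- ===== CLAIM (what is proved, stated in full; the proofs are below) =====
def Claim_equal_get_vehicle_impact : Prop := ∀ (lanes : List (List (String × String))), Dom_get_vehicle_impact lanes → Pre_get_vehicle_impact lanes → Spec_get_vehicle_impact lanes (get_vehicle_impact lanes)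

-- ===== LEMMAS AND PROOFS =====

-- A's loop is countP of non-open statuses over the mapped status list.
-- A's loop is countP of non-open statuses over the mapped status list.
theorem count_eq (lanes : List (List (String × String))) :
    (lanes.foldl
      (fun n i => if ((PySem.Dict.mk i).get? "status").getD "" ≠ "open" then n + 1 else n)
      (0 : Int))
    = (((lanes.map (fun l => ((PySem.Dict.mk l).get? "status").getD "")).countP
        (fun s => decide (s ≠ "open")) : Nat) : Int) := by
  rw [List.countP_map]
  have h := PySem.List.foldl_count_if
    (fun i : List (String × String) => decide (((PySem.Dict.mk i).get? "status").getD "" ≠ "open"))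
    lanes 0
  simpa using h

theorem b_char (ss : List String) :
    (if ¬ PySem.Set.contains (PySem.Set.ofList ss) "open" then "all-lanes-closed"
     else if PySem.Set.equal (PySem.Set.ofList ss) ["open"] then "all-lanes-open"
     else "some-lanes-closed")
    = (if ss.countP (fun s => decide (s ≠ "open")) = ss.length then "all-lanes-closed"
       else if ss.countP (fun s => decide (s ≠ "open")) = 0 then "all-lanes-open"
       else "some-lanes-closed") := by
  have hc : PySem.Set.contains (PySem.Set.ofList ss) "open" = true ↔ "open" ∈ ss := by
    rw [PySem.Set.contains_iff, PySem.Set.mem_ofList]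
  by_cases h1 : ss.countP (fun s => decide (s ≠ "open")) = ss.length
  · have hno : "open" ∉ ss := fun hm => by
      have := List.countP_eq_length.mp h1 _ hm; simp at this
    simp [hno]
  · have hopen : "open" ∈ ss := by
      by_contra hno
      exact h1 (List.countP_eq_length.mpr (fun a ha => by
        simp only [decide_eq_true_eq]; rintro rfl; exact hno ha))
    by_cases h2 : ss.countP (fun s => decide (s ≠ "open")) = 0
    · have hall : ∀ a ∈ ss, a = "open" := fun a ha => by
        have := List.countP_eq_zero.mp h2 _ ha; simpa using this
      have heq : PySem.Set.equal (PySem.Set.ofList ss) ["open"] = true := by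
        rw [PySem.Set.equal_iff]
        intro x
        simp only [PySem.Set.mem_ofList, List.mem_singleton]
        exact ⟨fun hx => hall _ hx, fun hx => hx ▸ hopen⟩
      simp only [hc, hopen, not_true_eq_false, if_false, heq, if_true]
      rw [if_neg h1, if_pos h2]
    · obtain ⟨a, ha, hane⟩ : ∃ a ∈ ss, a ≠ "open" := by
        by_contra hno
        push Not at hno
        exact h2 (List.countP_eq_zero.mpr (fun a hax => by simpa using hno a hax))
      have heq : ¬ PySem.Set.equal (PySem.Set.ofList ss) ["open"] = true := by
        rw [PySem.Set.equal_iff]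
        intro h
        exact hane (by simpa using (h a).mp ((PySem.Set.mem_ofList ss a).mpr ha))
      simp only [hc, hopen, not_true_eq_false, if_false, if_neg heq]
      rw [if_neg h1, if_neg h2]

-- ===== VERDICT (by name: the statement is the Claim_ definition above) =====
theorem get_vehicle_impact_spec : Claim_equal_get_vehicle_impact := by
  intro lanes _ _
  unfold Spec_get_vehicle_impact get_vehicle_impact get_vehicle_impact_alt
  simp only [count_eq, b_char, List.countP_map, List.length_map, Nat.cast_inj,
    Nat.cast_eq_zero]
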